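-- pv_equiv track=rewrite | github.com/MarcusJul/LanceHackerRank | IPK/String Manipulation/Special String again.py | substrCount
-- ===== SOURCE A (Python) =====
-- def substrCount(n, s):
--
--     cnt = n
--     def findS(st, l):
--         if len(list(set(st)))==1:
--             return True
--         if l%2==0:
--             return False
--         else:
--             # st[int(l-1)/2]
--             mid = st[int((l-1)/2)]
--             if mid!=st[int((l-1)/2+1)] and st[int((l-1)/2-1)]!=mid and len(list(set(st)))<=2:
--                 return True
--             else:
--                 return False
--
--     for i in range(2,n+1):
--         for k in range(n-i+1):
--             if findS(s[k:k+i],i):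
--                 cnt+=1
--
--     return cnt
-- ===== SOURCE B (Python) =====
-- def substrCount(n, s):
--     # One pass per start index: grow the window rightward, maintaining the set of
--     # distinct characters incrementally, so each window is judged in O(1).
--     cnt = n
--     for k in range(n):
--         seen = set()
--         d = 0
--         for j in range(k, n):
--             c = s[j]
--             if c not in seen:
--                 seen.add(c)
--                 d += 1
--             L = j - k + 1
--             if L >= 2:
--                 if d == 1:
--                     cnt += 1
--                 elif L % 2 == 1 and d == 2:
--                     m = k + (L - 1) // 2
--                     if s[m] != s[m - 1] and s[m] != s[m + 1]:
--                         cnt += 1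
--     return cnt
-- ===== Notes on version B (the rewrite author's own statement) =====
-- stated objective: faster
-- what changed: Replaces A's length-by-start double loop that re-slices every substring and rebuilds set(st) from scratch (O(n) work per window) with a per-start growing window that maintains the distinct-character count incrementally and checks the middle/neighbour condition by direct O(1) indexing into s.
-- outside the precondition, e.g. on substrCount(2, ''): A returns 2, B raises IndexError
import Mathlib
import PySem

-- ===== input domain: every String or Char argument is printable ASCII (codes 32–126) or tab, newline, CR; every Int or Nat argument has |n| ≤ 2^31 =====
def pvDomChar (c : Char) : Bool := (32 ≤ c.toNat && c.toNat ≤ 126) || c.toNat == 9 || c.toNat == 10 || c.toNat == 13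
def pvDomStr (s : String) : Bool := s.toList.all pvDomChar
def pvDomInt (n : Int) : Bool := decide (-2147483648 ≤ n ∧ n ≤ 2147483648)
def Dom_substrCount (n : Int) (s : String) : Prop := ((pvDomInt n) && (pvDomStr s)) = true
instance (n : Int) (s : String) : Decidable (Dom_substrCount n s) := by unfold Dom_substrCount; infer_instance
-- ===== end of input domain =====

-- B replaces A's slice-and-rebuild-the-set scan of every substring by a per-start growing
-- window with an incrementally maintained distinct-character count (objective: faster).

-- ===== PORT A =====
-- helper findS(st, l); `int((l-1)/2)` is float division then int: on the odd l reaching that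
-- branch (|l| ≤ 2^31) it equals (l-1) // 2, ported as PySem.Int.floordiv.
def pvFindS (st : List Char) (l : Int) : Bool :=
  if (PySem.Set.ofList st).length = 1 then true
  else if PySem.Int.mod l 2 = 0 then false
  else
    match PySem.List.pyGet? st (PySem.Int.floordiv (l - 1) 2) with
    | none => false          -- Python raises IndexError here (outside Pre_)
    | some mid =>
      match PySem.List.pyGet? st (PySem.Int.floordiv (l - 1) 2 + 1) with
      | none => false        -- IndexError (outside Pre_)
      | some r =>
        if mid ≠ r then      -- short-circuit `and`: st[…-1] only read when mid != st[…+1]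
          match PySem.List.pyGet? st (PySem.Int.floordiv (l - 1) 2 - 1) with
          | none => false    -- IndexError (outside Pre_)
          | some lft => if lft ≠ mid ∧ (PySem.Set.ofList st).length ≤ 2 then true else false
        else false

def substrCount (n : Int) (s : String) : Int :=
  let cs := s.toList
  (PySem.List.pyRange 2 (n + 1) 1).foldl (fun cnt i =>
    (PySem.List.pyRange 0 (n - i + 1) 1).foldl (fun cnt k =>
      if pvFindS (PySem.List.slice cs (some k) (some (k + i))) i then cnt + 1 else cnt) cnt) n

-- ===== PORT B =====
-- one step of B's inner loop; state = (seen, d, cnt); s[j], s[m±1] are in range under Pre_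
def pvStep (cs : List Char) (k : Int) (st : PySem.Set Char × Int × Int) (j : Int) :
    PySem.Set Char × Int × Int :=
  let c := PySem.List.pyGetD cs j ' '
  let (seen, d) :=
    if PySem.Set.contains st.1 c then (st.1, st.2.1) else (PySem.Set.add st.1 c, st.2.1 + 1)
  let L := j - k + 1
  let cnt :=
    if 2 ≤ L then
      if d = 1 then st.2.2 + 1
      else if PySem.Int.mod L 2 = 1 ∧ d = 2 then
        let m := k + PySem.Int.floordiv (L - 1) 2
        if PySem.List.pyGetD cs m ' ' ≠ PySem.List.pyGetD cs (m - 1) ' ' ∧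
           PySem.List.pyGetD cs m ' ' ≠ PySem.List.pyGetD cs (m + 1) ' ' then st.2.2 + 1
        else st.2.2
      else st.2.2
    else st.2.2
  (seen, d, cnt)

def substrCount_alt (n : Int) (s : String) : Int :=
  let cs := s.toList
  (PySem.List.pyRange 0 n 1).foldl (fun cnt k =>
    ((PySem.List.pyRange k n 1).foldl (pvStep cs k) (PySem.Set.empty, 0, cnt)).2.2) n

-- ===== PRECONDITION & SPEC =====
-- Pre_ excludes inputs with n > len(s): there A's findS indexes past the end of a short slice
-- and raises IndexError (A returns only on degenerate such inputs, e.g. n ≤ 2 or near-uniform s,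
-- where B's natural indexing of s[0:n] itself raises).
def Pre_substrCount (n : Int) (s : String) : Prop := n ≤ (s.toList.length : Int)
instance (n : Int) (s : String) : Decidable (Pre_substrCount n s) := by
  unfold Pre_substrCount; infer_instance
def pvWitness_substrCount : Int × String := (6, "aabcaa")

def Spec_substrCount (n : Int) (s : String) (out : Int) : Prop := out = substrCount_alt n s
instance (n : Int) (s : String) (out : Int) : Decidable (Spec_substrCount n s out) := by
  unfold Spec_substrCount; infer_instance

-- ===== CLAIM (what is proved, stated in full; the proofs are below) =====
def Claim_equal_substrCount : Prop := ∀ (n : Int) (s : String),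
  Dom_substrCount n s → Pre_substrCount n s → Spec_substrCount n s (substrCount n s)

-- ===== LEMMAS AND PROOFS =====

-- B's per-window predicate with the maintained distinct count written out explicitly:
-- pvG cs k j decides whether the window cs[k:j+1] is counted.
def pvG (cs : List Char) (k j : Int) : Bool :=
  let d : Int := ((PySem.Set.ofList (PySem.List.slice cs (some k) (some (j + 1)))).length : Int)
  let L := j - k + 1
  if 2 ≤ L then
    if d = 1 then true
    else if PySem.Int.mod L 2 = 1 ∧ d = 2 then
      let m := k + PySem.Int.floordiv (L - 1) 2
      decide (PySem.List.pyGetD cs m ' ' ≠ PySem.List.pyGetD cs (m - 1) ' ' ∧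
              PySem.List.pyGetD cs m ' ' ≠ PySem.List.pyGetD cs (m + 1) ' ')
    else false
  else false

theorem pvG_self (cs : List Char) (k : Int) : pvG cs k k = false := by
  simp [pvG]

theorem pv_foldl_count (l : List Int) (p : Int → Bool) (a : Int) :
    l.foldl (fun cnt k => if p k then cnt + 1 else cnt) a
  = a + (l.map (fun k => if p k then (1:Int) else 0)).sum := by
  rw [show (fun (cnt:Int) k => if p k then cnt + 1 else cnt)
        = fun (cnt:Int) k => cnt + (if p k then (1:Int) else 0) from
      funext fun c => funext fun k => by split <;> simp]
  exact PySem.List.foldl_add _ _ _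

theorem pv_pyRange_sum (a b : Int) (g : Int → Int) :
    ((PySem.List.pyRange a b 1).map g).sum = ∑ x ∈ Finset.range (b - a).toNat, g (a + (x:Int)) := by
  rw [PySem.List.pyRange_one, List.map_map]; rfl

theorem pv_sum_shift (M : Nat) (a : Nat) (H : Nat → Int) :
    ∑ b ∈ Finset.range (M - a), H b = ∑ b ∈ Finset.range M, if a + b < M then H b else 0 := by
  have h1 : ∑ b ∈ Finset.range M, (if a + b < M then H b else 0)
          = ∑ b ∈ Finset.range (M - a), (if a + b < M then H b else 0) :=
    (Finset.sum_subset (by intro x hx; simp only [Finset.mem_range] at hx ⊢; omega)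
      (fun b hb hnb => by simp only [Finset.mem_range] at hb hnb; rw [if_neg (by omega)])).symm
  rw [h1]
  exact Finset.sum_congr rfl fun b hb => (if_pos (by simp only [Finset.mem_range] at hb; omega)).symm

theorem pv_tri (M : Nat) (G : Nat → Nat → Int) :
    ∑ a ∈ Finset.range M, ∑ b ∈ Finset.range (M - a), G a b
  = ∑ b ∈ Finset.range M, ∑ a ∈ Finset.range (M - b), G a b := by
  calc ∑ a ∈ Finset.range M, ∑ b ∈ Finset.range (M - a), G a b
      = ∑ a ∈ Finset.range M, ∑ b ∈ Finset.range M, if a + b < M then G a b else 0 :=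
        Finset.sum_congr rfl fun a _ => pv_sum_shift M a (G a)
    _ = ∑ b ∈ Finset.range M, ∑ a ∈ Finset.range M, if a + b < M then G a b else 0 := Finset.sum_comm
    _ = ∑ b ∈ Finset.range M, ∑ a ∈ Finset.range (M - b), G a b := by
        refine Finset.sum_congr rfl fun b _ => ?_
        rw [pv_sum_shift M b (fun a => G a b)]
        exact Finset.sum_congr rfl fun a _ => by rw [Nat.add_comm]

-- A's value as a double sum (for 0 ≤ n)
theorem pvA_sum (s : String) (N : Nat) :
    substrCount (N : Int) s
  = (N : Int) + ∑ a ∈ Finset.range (N - 1), ∑ b ∈ Finset.range (N - 1 - a),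
      (if pvFindS (PySem.List.slice s.toList (some (b : Int)) (some ((b : Int) + ((a : Int) + 2))))
          ((a : Int) + 2) then (1 : Int) else 0) := by
  simp only [substrCount]
  have h1 : ∀ (cnt i : Int),
      (PySem.List.pyRange 0 ((N:Int) - i + 1) 1).foldl (fun cnt k =>
        if pvFindS (PySem.List.slice s.toList (some k) (some (k + i))) i then cnt + 1 else cnt) cnt
    = cnt + ((PySem.List.pyRange 0 ((N:Int) - i + 1) 1).map
        (fun k => if pvFindS (PySem.List.slice s.toList (some k) (some (k + i))) i then (1:Int) else 0)).sum :=
    fun cnt i => pv_foldl_count _ _ _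
  rw [show (fun (cnt i : Int) =>
      (PySem.List.pyRange 0 ((N:Int) - i + 1) 1).foldl (fun cnt k =>
        if pvFindS (PySem.List.slice s.toList (some k) (some (k + i))) i then cnt + 1 else cnt) cnt)
    = (fun (cnt i : Int) => cnt + ((PySem.List.pyRange 0 ((N:Int) - i + 1) 1).map
        (fun k => if pvFindS (PySem.List.slice s.toList (some k) (some (k + i))) i then (1:Int) else 0)).sum)
    from funext fun c => funext fun i => h1 c i]
  rw [PySem.List.foldl_add, pv_pyRange_sum]
  have hM : ((N:Int) + 1 - 2).toNat = N - 1 := by omega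
  rw [hM]
  refine congrArg _ (Finset.sum_congr rfl fun a ha => ?_)
  rw [pv_pyRange_sum]
  have h2 : ((N:Int) - (2 + (a:Int)) + 1 - 0).toNat = N - 1 - a := by omega
  rw [h2]
  refine Finset.sum_congr rfl fun b hb => ?_
  have : (2 + (a:Int)) = ((a:Int) + 2) := by ring
  rw [this]
  norm_num

theorem pv_window_succ (cs : List Char) (k j0 : Nat) (hk : k ≤ j0) (hj : j0 < cs.length) :
    (cs.drop k).take (j0 + 1 - k) = (cs.drop k).take (j0 - k) ++ [cs[j0]] := by
  have hlt : j0 - k < (cs.drop k).length := by simp [List.length_drop]; omega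
  have : (cs.drop k)[j0 - k] = cs[j0]'hj := by
    rw [List.getElem_drop]; congr 1; omega
  rw [show j0 + 1 - k = (j0 - k) + 1 by omega, List.take_succ_eq_append_getElem hlt, this]

theorem pv_ofList_append (xs : List Char) (c : Char) :
    PySem.Set.ofList (xs ++ [c]) = PySem.Set.add (PySem.Set.ofList xs) c := by
  simp [PySem.Set.ofList_eq_foldl, List.foldl_append]

-- one step of B's inner loop maintains (seen, d) and adds B's counting decision
theorem pvStep_eq (cs : List Char) (N k j0 : Nat) (cnt : Int)
    (hk : k ≤ j0) (hj : j0 < N) (hN : N ≤ cs.length) :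
    pvStep cs (k:Int)
      (PySem.Set.ofList ((cs.drop k).take (j0-k)),
       ((PySem.Set.ofList ((cs.drop k).take (j0-k))).length : Int), cnt) (j0:Int)
  = (PySem.Set.ofList ((cs.drop k).take (j0+1-k)),
     ((PySem.Set.ofList ((cs.drop k).take (j0+1-k))).length : Int),
     cnt + if pvG cs (k:Int) (j0:Int) then 1 else 0) := by
  have hjlen : j0 < cs.length := lt_of_lt_of_le hj hN
  have hwin := pv_window_succ cs k j0 hk hjlen
  have hc : PySem.List.pyGetD cs (j0:Int) ' ' = cs[j0] := by
    simp [PySem.List.pyGetD_natCast, List.getD_eq_getElem?_getD, hjlen]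
  have hslice : PySem.List.slice cs (some (k:Int)) (some ((j0:Int) + 1)) = (cs.drop k).take (j0 + 1 - k) := by
    rw [show ((j0:Int) + 1) = ((j0+1 : Nat) : Int) by push_cast; ring, PySem.List.slice_natCast]
  set S := PySem.Set.ofList ((cs.drop k).take (j0-k)) with hS
  have hS' : PySem.Set.ofList ((cs.drop k).take (j0+1-k)) = PySem.Set.add S (cs[j0]'hjlen) := by
    rw [hwin, pv_ofList_append]
  simp only [pvStep, pvG, hc, hslice, hS']
  by_cases hmem : PySem.Set.contains S (cs[j0]'hjlen) = true
  · have hadd : PySem.Set.add S (cs[j0]'hjlen) = S := by unfold PySem.Set.add; rw [if_pos hmem]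
    rw [hadd]
    simp only [hmem, if_true]
    split_ifs <;> simp_all
  · have hadd : PySem.Set.add S (cs[j0]'hjlen) = S ++ [cs[j0]'hjlen] := by
      unfold PySem.Set.add; rw [if_neg hmem]
    simp only [Bool.not_eq_true] at hmem
    simp only [hmem, hadd, List.length_append, List.length_singleton]
    push_cast
    split_ifs <;> simp_all

theorem pvB_inner_aux (cs : List Char) (N k : Nat) (hN : N ≤ cs.length) :
    ∀ (M j0 : Nat) (cnt : Int), k ≤ j0 → N - j0 = M →
    ((PySem.List.pyRange (j0:Int) (N:Int) 1).foldl (pvStep cs (k:Int))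
      (PySem.Set.ofList ((cs.drop k).take (j0-k)),
       ((PySem.Set.ofList ((cs.drop k).take (j0-k))).length : Int), cnt)).2.2
  = cnt + ∑ c ∈ Finset.range M, (if pvG cs (k:Int) ((j0:Int)+(c:Int)) then (1:Int) else 0) := by
  intro M
  induction M with
  | zero =>
    intro j0 cnt hk hM
    rw [PySem.List.pyRange_one_eq_nil (by omega)]
    simp
  | succ M ih =>
    intro j0 cnt hk hM
    have hj : j0 < N := by omega
    rw [PySem.List.pyRange_one_cons (by exact_mod_cast hj), List.foldl_cons,
        pvStep_eq cs N k j0 cnt hk hj hN,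
        show ((j0:Int)+1) = ((j0+1:Nat):Int) by push_cast; ring,
        ih (j0+1) _ (by omega) (by omega),
        Finset.sum_range_succ']
    have hcong : ∑ c ∈ Finset.range M, (if pvG cs (k:Int) (((j0+1:Nat):Int)+(c:Int)) then (1:Int) else 0)
        = ∑ c ∈ Finset.range M, (if pvG cs (k:Int) ((j0:Int)+((c:Nat)+1:Nat)) then (1:Int) else 0) := by
      refine Finset.sum_congr rfl fun c _ => ?_
      congr 2
      push_cast; ring
    rw [hcong]
    simp only [Nat.cast_add, Nat.cast_zero, Nat.cast_one, add_zero]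
    ring

-- B's value as a double sum (for 0 ≤ n ≤ len(s))
theorem pvB_sum (s : String) (N : Nat) (hN : N ≤ s.toList.length) :
    substrCount_alt (N : Int) s
  = (N : Int) + ∑ k ∈ Finset.range N, ∑ c ∈ Finset.range (N - k),
      (if pvG s.toList (k : Int) ((k : Int) + (c : Int)) then (1 : Int) else 0) := by
  simp only [substrCount_alt]
  rw [PySem.List.pyRange_zero_nat, List.foldl_map]
  have hfun : (fun (cnt : Int) (k : Nat) =>
      ((PySem.List.pyRange (k:Int) (N:Int) 1).foldl (pvStep s.toList (k:Int))
        (PySem.Set.empty, 0, cnt)).2.2)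
    = (fun (cnt : Int) (k : Nat) => cnt + ∑ c ∈ Finset.range (N - k),
        (if pvG s.toList (k : Int) ((k : Int) + (c : Int)) then (1 : Int) else 0)) := by
    funext cnt k
    have h0 : PySem.Set.ofList ((s.toList.drop k).take (k - k)) = PySem.Set.empty := by
      simp [PySem.Set.ofList]
    have := pvB_inner_aux s.toList N k hN (N - k) k cnt le_rfl rfl
    rw [h0] at this
    simpa using this
  rw [hfun, PySem.List.foldl_add]
  rfl

-- pointwise: A's findS on the full-length slice equals B's incremental check
theorem pv_pointwise (cs : List Char) (k i : Nat) (hi : 2 ≤ i) (hlen : k + i ≤ cs.length) :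
    pvFindS (PySem.List.slice cs (some (k : Int)) (some ((k : Int) + (i : Int)))) (i : Int)
  = pvG cs (k : Int) ((k : Int) + (i : Int) - 1) := by
  have hsl : PySem.List.slice cs (some (k : Int)) (some ((k : Int) + (i : Int)))
      = (cs.drop k).take i := PySem.List.slice_natCast_add cs k i
  have hsl2 : PySem.List.slice cs (some (k : Int)) (some ((k : Int) + (i : Int) - 1 + 1))
      = (cs.drop k).take i := by rw [show (k : Int) + (i : Int) - 1 + 1 = (k:Int) + (i:Int) by ring, hsl]
  set w := (cs.drop k).take i with hw
  have hwlen : w.length = i := by simp [hw]; omega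
  have hwne : w ≠ [] := by intro h; rw [h] at hwlen; simp at hwlen; omega
  set d := (PySem.Set.ofList w).length with hd
  have hd0 : d ≠ 0 := by
    intro h
    have hmem : w.get ⟨0, by omega⟩ ∈ PySem.Set.ofList w := by
      rw [PySem.Set.mem_ofList]; exact w.get_mem _
    rw [List.length_eq_zero_iff] at h
    rw [h] at hmem; exact (List.not_mem_nil) hmem
  have hL : (k : Int) + (i : Int) - 1 - (k:Int) + 1 = (i : Int) := by ring
  simp only [pvFindS, pvG, hsl, hsl2, hL, ← hd]
  have hi' : (2:Int) ≤ (i:Int) := by exact_mod_cast hi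
  by_cases h1 : d = 1
  · simp [h1, hi']
  · have h1' : ¬ ((d : Int) = 1) := by exact_mod_cast fun h => h1 (by exact_mod_cast h)
    rw [if_neg h1, if_pos hi', if_neg h1',
        PySem.Int.mod_eq_emod_of_pos (by norm_num : (0:Int) < 2),
        PySem.Int.floordiv_eq_ediv_of_pos (by norm_num : (0:Int) < 2)]
    by_cases hpar : (i : Int) % 2 = 0
    · rw [if_pos hpar, if_neg (fun (h : _ ∧ _) => by omega : ¬ ((i:Int) % 2 = 1 ∧ (d:Int) = 2))]
    · rw [if_neg hpar]
      have hodd : (i : Int) % 2 = 1 := by omega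
      obtain ⟨t, ht⟩ : ∃ t : Nat, i = 2 * t + 1 := ⟨(i-1)/2, by omega⟩
      have ht1 : 1 ≤ t := by omega
      have hm0 : ((i:Int) - 1) / 2 = (t : Int) := by omega
      have hget : ∀ (x : Nat), (hx : x < i) → PySem.List.pyGet? w (x : Int) = some (cs[k + x]'(by omega)) := by
        intro x hx
        rw [PySem.List.pyGet?_natCast, List.getElem?_eq_getElem (by omega)]
        have hx2 : w[x]'(by omega) = cs[k + x]'(by omega) := by
          simp [hw, List.getElem_take, List.getElem_drop]
        rw [hx2]
      have hgetD : ∀ (x : Nat), (hx : x < i) → PySem.List.pyGetD cs ((k:Int) + (x:Int)) ' ' = cs[k + x]'(by omega) := by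
        intro x hx
        rw [PySem.List.pyGetD_eq_getElem cs ' ' (by positivity) (by push_cast; omega)]
        congr 1
      have e1 : PySem.List.pyGet? w (((i:Int) - 1) / 2) = some (cs[k + t]'(by omega)) := by
        rw [hm0]; exact hget t (by omega)
      have e2 : PySem.List.pyGet? w (((i:Int) - 1) / 2 + 1) = some (cs[k + (t+1)]'(by omega)) := by
        rw [hm0, show (t:Int) + 1 = ((t+1 : Nat) : Int) by push_cast; ring]; exact hget (t+1) (by omega)
      have e3 : PySem.List.pyGet? w (((i:Int) - 1) / 2 - 1) = some (cs[k + (t-1)]'(by omega)) := by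
        rw [hm0, show (t:Int) - 1 = ((t-1 : Nat) : Int) by push_cast [ht1]; ring]; exact hget (t-1) (by omega)
      have hm : (k:Int) + ((i:Int) - 1) / 2 = (k:Int) + (t:Int) := by omega
      have f1 : PySem.List.pyGetD cs ((k:Int) + (t:Int)) ' ' = cs[k + t]'(by omega) := hgetD t (by omega)
      have f2 : PySem.List.pyGetD cs ((k:Int) + (t:Int) + 1) ' ' = cs[k + (t+1)]'(by omega) := by
        rw [show (k:Int) + (t:Int) + 1 = (k:Int) + ((t+1:Nat):Int) by push_cast; ring]
        exact hgetD (t+1) (by omega)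
      have f3 : PySem.List.pyGetD cs ((k:Int) + (t:Int) - 1) ' ' = cs[k + (t-1)]'(by omega) := by
        rw [show (k:Int) + (t:Int) - 1 = (k:Int) + ((t-1:Nat):Int) by push_cast [ht1]; ring]
        exact hgetD (t-1) (by omega)
      simp only [e1, e2, e3, hm, f1, f2, f3]
      by_cases hd2 : d = 2
      · rw [if_pos (⟨hodd, by exact_mod_cast hd2⟩ : (i:Int) % 2 = 1 ∧ (d:Int) = 2)]
        by_cases q1 : cs[k + t]'(by omega) = cs[k + (t+1)]'(by omega)
        · rw [if_neg (fun h => h q1)]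
          have hq1 : ¬(cs[k + t]'(by omega) ≠ cs[k + (t+1)]'(by omega)) := fun h => h q1
          simp [hq1]
        · rw [if_pos q1]
          by_cases q2 : cs[k + (t-1)]'(by omega) = cs[k + t]'(by omega)
          · rw [if_neg (fun (h : (cs[k + (t-1)]'(by omega) ≠ cs[k + t]'(by omega)) ∧ d ≤ 2) => h.1 q2)]
            have hq : ¬(cs[k + t]'(by omega) ≠ cs[k + (t-1)]'(by omega)) := fun h => h q2.symm
            simp [hq]
          · rw [if_pos (⟨q2, by omega⟩ : (cs[k + (t-1)]'(by omega) ≠ cs[k + t]'(by omega)) ∧ d ≤ 2)]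
            simp [Ne.symm q2, q1]
      · have hd3 : 3 ≤ d := by omega
        have hR : ¬ ((i:Int) % 2 = 1 ∧ (d:Int) = 2) := fun h => hd2 (by exact_mod_cast h.2)
        by_cases q1 : cs[k + t]'(by omega) = cs[k + (t+1)]'(by omega)
        · rw [if_neg (fun h => h q1), if_neg hR]
        · rw [if_pos q1,
              if_neg (fun (h : (cs[k + (t-1)]'(by omega) ≠ cs[k + t]'(by omega)) ∧ d ≤ 2) => absurd h.2 (by omega)),
              if_neg hR]

theorem pv_main : ∀ (n : Int) (s : String), n ≤ (s.toList.length : Int) →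
    substrCount n s = substrCount_alt n s := by
  intro n s hpre
  by_cases hn : n < 0
  · rw [show substrCount n s = n by
        simp [substrCount, PySem.List.pyRange_one_eq_nil (by omega : n + 1 ≤ 2)],
      show substrCount_alt n s = n by
        simp [substrCount_alt, PySem.List.pyRange_one_eq_nil (by omega : n ≤ 0)]]
  · obtain ⟨N, rfl⟩ : ∃ N : Nat, n = (N:Int) := ⟨n.toNat, (Int.toNat_of_nonneg (by omega)).symm⟩
    have hN : N ≤ s.toList.length := by exact_mod_cast hpre
    rw [pvA_sum s N, pvB_sum s N hN]
    rcases Nat.eq_zero_or_pos N with h0 | h0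
    · subst h0; simp
    congr 1
    set cs := s.toList with hcs
    set M := N - 1 with hM
    have hstepA : ∑ a ∈ Finset.range M, ∑ b ∈ Finset.range (M - a),
        (if pvFindS (PySem.List.slice cs (some (b : Int)) (some ((b : Int) + ((a : Int) + 2))))
            ((a : Int) + 2) then (1 : Int) else 0)
      = ∑ a ∈ Finset.range M, ∑ b ∈ Finset.range (M - a),
        (if pvG cs (b : Int) ((b : Int) + (a : Int) + 1) then (1 : Int) else 0) := by
      refine Finset.sum_congr rfl fun a ha => Finset.sum_congr rfl fun b hb => ?_
      simp only [Finset.mem_range] at ha hb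
      have h1 : ((a:Int) + 2) = ((a + 2 : Nat) : Int) := by push_cast; ring
      rw [h1, pv_pointwise cs b (a+2) (by omega) (by omega)]
      congr 2
      push_cast; ring
    rw [hstepA, pv_tri M (fun a b => if pvG cs (b : Int) ((b : Int) + (a : Int) + 1) then (1 : Int) else 0)]
    symm
    calc ∑ k ∈ Finset.range N, ∑ c ∈ Finset.range (N - k),
          (if pvG cs (k : Int) ((k : Int) + (c : Int)) then (1 : Int) else 0)
        = ∑ k ∈ Finset.range N, ∑ a ∈ Finset.range (M - k),
          (if pvG cs (k : Int) ((k : Int) + (a : Int) + 1) then (1 : Int) else 0) := by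
          refine Finset.sum_congr rfl fun k hk => ?_
          simp only [Finset.mem_range] at hk
          rw [show N - k = (M - k) + 1 by omega, Finset.sum_range_succ']
          have hz : (if pvG cs (k : Int) ((k : Int) + ((0:Nat) : Int)) then (1 : Int) else 0) = 0 := by
            norm_num [pvG_self]
          rw [hz, add_zero]
          refine Finset.sum_congr rfl fun a ha => ?_
          congr 2
      _ = ∑ k ∈ Finset.range M, ∑ a ∈ Finset.range (M - k),
          (if pvG cs (k : Int) ((k : Int) + (a : Int) + 1) then (1 : Int) else 0) := by
          rw [show N = M + 1 by omega, Finset.sum_range_succ]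
          simp

-- ===== VERDICT (by name: the statement is the Claim_ definition above) =====
theorem substrCount_spec : Claim_equal_substrCount := by
  intro n s _hd hpre
  unfold Spec_substrCount
  exact pv_main n s hpre
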